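-- pv_equiv track=rewrite | github.com/21A91A1255/Owlcoder3.0 | Medium/Check if frequencies can be equal/check-if-frequencies-can-be-equal.py | sameFreq
-- ===== SOURCE A (Python) =====
-- from collections import Counter
--
-- def sameFreq(s):
--     # code here
--     l=[]
--     v=0
--     c=Counter(s)
--     d=0
--     for i in c.keys():
--         d+=1
--         if c[i] in l:
--             v+=1
--         l.append(c[i])
--     if(len(set(l))==1):
--         return 1
--     if((v+1)!=(d-1)):
--         return 0
--     else:
--         k=list(l)
--         l.sort()
--         l[0]=l[0]-1
--         if((l[0])==0):
--             l.remove(l[0])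
--         if(len(set(l))==1):
--             return 1
--         else:
--             k.sort()
--             k[len(k)-1]=k[len(k)-1]-1
--             if((k[len(k)-1])==0):
--                 k.remove(k[len(k)-1])
--             if(len(set(k))==1):
--                 return 1
--     return 0
-- ===== SOURCE B (Python) =====
-- from collections import Counter
--
-- def sameFreq(s):
--     # Closed-form test on the frequency-of-frequencies instead of simulating removals.
--     ff = Counter(Counter(s).values())
--     if len(ff) == 1:
--         return 1
--     if len(ff) == 2:
--         a, b = min(ff), max(ff)
--         if (a == 1 and ff[a] == 1) or (b == a + 1 and ff[b] == 1):
--             return 1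
--     return 0
-- ===== Notes on version B (the rewrite author's own statement) =====
-- stated objective: simpler
-- what changed: B replaces A's duplicate-frequency counting gate and its two sort/decrement/remove/re-check simulations with a closed-form arithmetic test on the Counter of frequency values (at most two distinct frequencies a<b; equalizable iff all equal, or a==1 occurring once, or b==a+1 occurring once).
import Mathlib
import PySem

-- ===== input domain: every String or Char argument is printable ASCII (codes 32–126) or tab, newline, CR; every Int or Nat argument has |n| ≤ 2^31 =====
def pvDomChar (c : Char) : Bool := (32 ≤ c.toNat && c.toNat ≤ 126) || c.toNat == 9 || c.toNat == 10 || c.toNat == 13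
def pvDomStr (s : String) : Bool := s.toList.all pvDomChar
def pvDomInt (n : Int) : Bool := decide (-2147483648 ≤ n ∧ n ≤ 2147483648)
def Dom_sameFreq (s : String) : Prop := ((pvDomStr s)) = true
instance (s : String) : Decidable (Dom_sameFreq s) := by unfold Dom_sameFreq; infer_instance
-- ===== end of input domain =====

-- B replaces A's duplicate-count gate and its two sort/decrement/re-check simulations by a
-- closed-form arithmetic test on the Counter of the frequency values (objective: simpler).

-- ===== PORT A =====
def sameFreq (s : String) : Int :=
  -- l=[]; v=0; c=Counter(s); d=0
  let c := PySem.Dict.counter s.toList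
  -- for i in c.keys(): d+=1; if c[i] in l: v+=1; l.append(c[i])
  let st := c.keys.foldl
    (fun (st : List Int × Int × Int) i =>
      (st.1 ++ [c.getD i 0], (if c.getD i 0 ∈ st.1 then st.2.1 + 1 else st.2.1), st.2.2 + 1))
    ([], 0, 0)
  let l := st.1
  let v := st.2.1
  let d := st.2.2
  if (PySem.Set.ofList l).length = 1 then 1
  else if v + 1 ≠ d - 1 then 0
  else
    -- k=list(l); l.sort(); l[0]=l[0]-1; if l[0]==0: l.remove(l[0])
    let k := l
    let l1 := PySem.List.sorted l (fun x => x) false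
    let l2 := PySem.List.pySetD l1 0 (PySem.List.pyGetD l1 0 0 - 1)
    let l3 := if PySem.List.pyGetD l2 0 0 = 0
              then ((PySem.List.remove? l2 (PySem.List.pyGetD l2 0 0)).getD l2)
              else l2
    if (PySem.Set.ofList l3).length = 1 then 1
    else
      -- k.sort(); k[len(k)-1]=k[len(k)-1]-1; if k[len(k)-1]==0: k.remove(k[len(k)-1])
      let k1 := PySem.List.sorted k (fun x => x) false
      let k2 := PySem.List.pySetD k1 ((k1.length : Int) - 1)
                  (PySem.List.pyGetD k1 ((k1.length : Int) - 1) 0 - 1)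
      let k3 := if PySem.List.pyGetD k2 ((k2.length : Int) - 1) 0 = 0
                then ((PySem.List.remove? k2 (PySem.List.pyGetD k2 ((k2.length : Int) - 1) 0)).getD k2)
                else k2
      if (PySem.Set.ofList k3).length = 1 then 1 else 0

-- ===== PORT B =====
def sameFreq_alt (s : String) : Int :=
  -- ff = Counter(Counter(s).values())
  let ff := PySem.Dict.counter (PySem.Dict.counter s.toList).values
  if ff.size = 1 then 1
  else if ff.size = 2 then
    -- a, b = min(ff), max(ff)   (min/max of a dict iterate its keys; guard arms are unreachable at size 2)
    let a := (PySem.List.min? ff.keys (fun x => x)).getD 0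
    let b := (PySem.List.max? ff.keys (fun x => x)).getD 0
    if (a = 1 ∧ ff.getD a 0 = 1) ∨ (b = a + 1 ∧ ff.getD b 0 = 1) then 1 else 0
  else 0

-- ===== PRECONDITION & SPEC =====
def Spec_sameFreq (s : String) (out : Int) : Prop := out = sameFreq_alt s
instance (s : String) (out : Int) : Decidable (Spec_sameFreq s out) := by unfold Spec_sameFreq; infer_instance

-- ===== CLAIM (what is proved, stated in full; the proofs are below) =====
def Claim_equal_sameFreq : Prop := ∀ (s : String), Dom_sameFreq s → Spec_sameFreq s (sameFreq s)

-- ===== LEMMAS AND PROOFS =====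

-- A's second (max-side) decrement attempt, as a function of the frequency list.
def KBranch (L : List Int) : Int :=
  let k1 := PySem.List.sorted L (fun x => x) false
  let k2 := PySem.List.pySetD k1 ((k1.length : Int) - 1)
              (PySem.List.pyGetD k1 ((k1.length : Int) - 1) 0 - 1)
  let k3 := if PySem.List.pyGetD k2 ((k2.length : Int) - 1) 0 = 0
            then ((PySem.List.remove? k2 (PySem.List.pyGetD k2 ((k2.length : Int) - 1) 0)).getD k2)
            else k2
  if (PySem.Set.ofList k3).length = 1 then 1 else 0

-- A's whole else-branch (both decrement attempts), as a function of the frequency list.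
def ATail (L : List Int) : Int :=
  let l1 := PySem.List.sorted L (fun x => x) false
  let l2 := PySem.List.pySetD l1 0 (PySem.List.pyGetD l1 0 0 - 1)
  let l3 := if PySem.List.pyGetD l2 0 0 = 0
            then ((PySem.List.remove? l2 (PySem.List.pyGetD l2 0 0)).getD l2)
            else l2
  if (PySem.Set.ofList l3).length = 1 then 1 else KBranch L

-- A's tail as a function of the list of frequency values (what A's loop produced).
def ACore (L : List Int) : Int :=
  if (PySem.Set.ofList L).length = 1 then 1
  else if ((L.length : Int) - ((PySem.Set.ofList L).length : Int)) + 1 ≠ (L.length : Int) - 1 then 0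
  else ATail L

-- B's tail as a function of the list of frequency values.
def BCore (L : List Int) : Int :=
  let ff := PySem.Dict.counter L
  if ff.size = 1 then 1
  else if ff.size = 2 then
    let a := (PySem.List.min? ff.keys (fun x => x)).getD 0
    let b := (PySem.List.max? ff.keys (fun x => x)).getD 0
    if (a = 1 ∧ ff.getD a 0 = 1) ∨ (b = a + 1 ∧ ff.getD b 0 = 1) then 1 else 0
  else 0

lemma pySetD_zero_cons (x v : Int) (t : List Int) :
    PySem.List.pySetD (x :: t) 0 v = v :: t := by
  rw [PySem.List.pySetD_of_nonneg _ _ (by norm_num)]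
  rfl

lemma set_append_last {α : Type} (xs : List α) (u v : α) :
    (xs ++ [u]).set xs.length v = xs ++ [v] := by
  induction xs with
  | nil => rfl
  | cons h t ih => simp

lemma getD_append_last {α : Type} (xs : List α) (u d : α) :
    (xs ++ [u]).getD xs.length d = u := by
  induction xs with
  | nil => rfl
  | cons h t ih => simp

lemma ofList_append_singleton {α : Type} [BEq α] (l : List α) (x : α) :
    PySem.Set.ofList (l ++ [x]) = PySem.Set.add (PySem.Set.ofList l) x := by
  simp [PySem.Set.ofList_eq_foldl, List.foldl_append]

lemma length_ofList_append_singleton (l : List Int) (x : Int) :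
    ((PySem.Set.ofList (l ++ [x])).length : Int)
      = if x ∈ l then ((PySem.Set.ofList l).length : Int)
        else ((PySem.Set.ofList l).length : Int) + 1 := by
  rw [ofList_append_singleton]
  by_cases hm : x ∈ l
  · have hc : PySem.Set.contains (PySem.Set.ofList l) x = true := by
      simpa [PySem.Set.contains_iff] using (PySem.Set.mem_ofList l x).mpr hm
    simp [PySem.Set.add, hm]
  · have hc : PySem.Set.contains (PySem.Set.ofList l) x = false := by
      simpa [PySem.Set.contains_iff] using fun h => hm ((PySem.Set.mem_ofList l x).mp h)
    simp [PySem.Set.add, hm]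

lemma loopA (c : PySem.Dict Char Int) (ks : List Char) (l0 : List Int) (v0 d0 : Int) :
    ks.foldl
      (fun (st : List Int × Int × Int) i =>
        (st.1 ++ [c.getD i 0], (if c.getD i 0 ∈ st.1 then st.2.1 + 1 else st.2.1), st.2.2 + 1))
      (l0, v0, d0)
    = (l0 ++ ks.map (fun i => c.getD i 0),
       v0 + (((l0 ++ ks.map (fun i => c.getD i 0)).length : Int)
             - ((PySem.Set.ofList (l0 ++ ks.map (fun i => c.getD i 0))).length : Int))
          - ((l0.length : Int) - ((PySem.Set.ofList l0).length : Int)),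
       d0 + ks.length) := by
  induction ks generalizing l0 v0 d0 with
  | nil => simp
  | cons i t ih =>
    simp only [List.foldl_cons, List.map_cons, List.length_cons]
    rw [ih]
    have hlen := length_ofList_append_singleton l0 (c.getD i 0)
    refine Prod.ext (by simp) (Prod.ext ?_ ?_)
    · have hl : l0 ++ c.getD i 0 :: List.map (fun i => c.getD i 0) t
          = l0 ++ [c.getD i 0] ++ List.map (fun i => c.getD i 0) t := by simp
      rw [hl, hlen]
      simp only [List.length_append, List.length_cons, List.length_nil]
      split_ifs with hm <;> (push_cast; omega)
    · push_cast
      omega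

lemma ofList_len_one_iff (m : List Int) :
    (PySem.Set.ofList m).length = 1 ↔ ∃ a, a ∈ m ∧ ∀ z ∈ m, z = a := by
  constructor
  · intro h
    obtain ⟨a, ha⟩ := List.length_eq_one_iff.mp h
    refine ⟨a, (PySem.Set.mem_ofList m a).mp (by rw [ha]; simp), ?_⟩
    intro z hz
    have hz' := (PySem.Set.mem_ofList m z).mpr hz
    rw [ha] at hz'
    simpa using hz'
  · rintro ⟨a, haM, hall⟩
    have hmem : ∀ z ∈ PySem.Set.ofList m, z = a :=
      fun z hz => hall z ((PySem.Set.mem_ofList m z).mp hz)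
    have hA : a ∈ PySem.Set.ofList m := (PySem.Set.mem_ofList m a).mpr haM
    have hnd := PySem.Set.nodup_ofList m
    rcases hS : PySem.Set.ofList m with _ | ⟨h1, t⟩
    · rw [hS] at hA; simp at hA
    · rw [hS] at hmem hnd
      cases t with
      | nil => rfl
      | cons h2 t2 =>
        have e1 : h1 = a := hmem _ (by simp)
        have e2 : h2 = a := hmem _ (by simp)
        rw [List.nodup_cons] at hnd
        exact absurd (by simp [e1, e2]) hnd.1

lemma ofList_len_ne_one (m : List Int) {x y : Int} (hx : x ∈ m) (hy : y ∈ m) (hxy : x ≠ y) :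
    (PySem.Set.ofList m).length ≠ 1 := by
  intro h
  obtain ⟨a, _, hall⟩ := (ofList_len_one_iff m).mp h
  exact hxy ((hall x hx).trans (hall y hy).symm)

lemma ofList_eq_nil {m : List Int} (h : PySem.Set.ofList m = []) : m = [] := by
  cases m with
  | nil => rfl
  | cons a t =>
    have := (PySem.Set.mem_ofList (a :: t) a).mpr (by simp)
    rw [h] at this
    simp at this

lemma sorted_two (L : List Int) (a b : Int) (hab : a < b)
    (hmem : ∀ z ∈ L, z = a ∨ z = b) :
    PySem.List.sorted L (fun x => x) false
      = List.replicate (L.count a) a ++ List.replicate (L.count b) b := by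
  apply PySem.List.sorted_id_eq_of_perm_of_pairwise
  · rw [List.perm_iff_count]
    intro z
    by_cases hz1 : z = a
    · subst hz1
      simp only [List.count_append, List.count_replicate]
      simp
      exact fun h => absurd h hab.ne'
    · by_cases hz2 : z = b
      · subst hz2
        simp only [List.count_append, List.count_replicate]
        simp
        exact fun h => absurd h hab.ne
      · have hzL : z ∉ L := fun hm => by rcases hmem z hm with h | h <;> simp_all
        simp only [List.count_append, List.count_replicate]
        simp [List.count_eq_zero.mpr hzL]
        exact ⟨fun h => by rw [h]; exact List.count_eq_zero.mpr hzL,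
               fun h => by rw [h]; exact List.count_eq_zero.mpr hzL⟩
  · rw [List.pairwise_append]
    refine ⟨List.pairwise_replicate.mpr (by simp), List.pairwise_replicate.mpr (by simp), ?_⟩
    intro u hu v hv
    rw [List.eq_of_mem_replicate hu, List.eq_of_mem_replicate hv]
    exact hab.le

lemma values_counter_pos (xs : List Char) :
    ∀ x ∈ (PySem.Dict.counter xs).values, 1 ≤ x := by
  intro x hx
  have hv : (PySem.Dict.counter xs).values
      = List.map (fun k => ((List.count k xs : Nat) : Int)) (PySem.Set.ofList xs) := by
    show (PySem.Dict.counter xs).items.map Prod.snd = _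
    rw [PySem.Dict.items_counter]
    simp
  rw [hv] at hx
  obtain ⟨k, hk, rfl⟩ := List.mem_map.mp hx
  have hkm : k ∈ xs := (PySem.Set.mem_ofList xs k).mp hk
  have := List.count_pos_iff.mpr hkm
  omega

lemma kbranch_eval (L : List Int) (a b : Int) (ca' cb' : Nat)
    (h1a : 1 ≤ a) (hab : a < b)
    (hsort : PySem.List.sorted L (fun x => x) false
      = List.replicate (ca' + 1) a ++ List.replicate (cb' + 1) b) :
    KBranch L = if b = a + 1 ∧ cb' = 0 then 1 else 0 := by
  have hb2 : 2 ≤ b := by omega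
  have hsort' : PySem.List.sorted L (fun x => x) false
      = (List.replicate (ca' + 1) a ++ List.replicate cb' b) ++ [b] := by
    rw [hsort, show List.replicate (cb' + 1) b = List.replicate cb' b ++ [b] by
          rw [List.replicate_succ']]
    simp [List.append_assoc]
  set F := List.replicate (ca' + 1) a ++ List.replicate cb' b with hF
  have hFlen : ((F ++ [b]).length : Int) - 1 = (F.length : Int) := by simp
  simp only [KBranch, hsort', hFlen]
  rw [PySem.List.pyGetD_natCast, getD_append_last]
  rw [PySem.List.pySetD_of_nonneg _ _ (by positivity), Int.toNat_natCast, set_append_last]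
  have hFlen2 : ((F ++ [b - 1]).length : Int) - 1 = (F.length : Int) := by simp
  rw [hFlen2, PySem.List.pyGetD_natCast, getD_append_last]
  rw [if_neg (show ¬(b - 1 = 0) from by omega)]
  by_cases hcond : b = a + 1 ∧ cb' = 0
  · obtain ⟨hb, hc⟩ := hcond
    rw [if_pos (show b = a + 1 ∧ cb' = 0 from ⟨hb, hc⟩), if_pos]
    rw [ofList_len_one_iff]
    refine ⟨a, by simp [hF, hc], ?_⟩
    intro z hz
    rcases List.mem_append.mp hz with hz | hz
    · rw [hF, hc] at hz
      simp [List.mem_replicate] at hz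
      exact hz
    · have : z = b - 1 := by simpa using hz
      omega
  · rw [if_neg hcond, if_neg]
    rcases Nat.eq_zero_or_pos cb' with hc | hc
    · have hb : b ≠ a + 1 := fun h => hcond ⟨h, hc⟩
      refine ofList_len_ne_one _ (x := a) (y := b - 1) ?_ ?_ (by omega)
      · exact List.mem_append_left _ (by simp [hF])
      · exact List.mem_append_right _ (by simp)
    · refine ofList_len_ne_one _ (x := b) (y := b - 1) ?_ ?_ (by omega)
      · refine List.mem_append_left _ ?_
        rw [hF]
        exact List.mem_append_right _ (by simp [List.mem_replicate]; omega)
      · exact List.mem_append_right _ (by simp)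

lemma tail_eval (L : List Int) (a b : Int) (ca' cb' : Nat)
    (h1a : 1 ≤ a) (hab : a < b)
    (hsort : PySem.List.sorted L (fun x => x) false
      = List.replicate (ca' + 1) a ++ List.replicate (cb' + 1) b) :
    ATail L = if (a = 1 ∧ ca' = 0) ∨ (b = a + 1 ∧ cb' = 0) then 1 else 0 := by
  have hk := kbranch_eval L a b ca' cb' h1a hab hsort
  have hsort'' : PySem.List.sorted L (fun x => x) false
      = a :: (List.replicate ca' a ++ List.replicate (cb' + 1) b) := by
    rw [hsort, List.replicate_succ]
    simp
  set t0 := List.replicate ca' a ++ List.replicate (cb' + 1) b with ht0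
  simp only [ATail, hsort'', PySem.List.pyGetD_zero_cons, pySetD_zero_cons]
  by_cases ha1 : a = 1
  · subst ha1
    rw [if_pos (show (1 : Int) - 1 = 0 from by norm_num)]
    rw [show (1 : Int) - 1 = 0 from by norm_num, PySem.List.remove?_cons_self, Option.getD_some]
    by_cases hca : ca' = 0
    · rw [if_pos, if_pos (Or.inl ⟨rfl, hca⟩)]
      rw [ofList_len_one_iff]
      refine ⟨b, by simp [ht0, hca], ?_⟩
      intro z hz
      rw [ht0, hca] at hz
      simp [List.mem_replicate] at hz
      exact hz
    · rw [if_neg, hk]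
      · split_ifs with h1 h2 <;> first | rfl | (exfalso; omega)
      · refine ofList_len_ne_one _ (x := 1) (y := b) ?_ ?_ (by omega)
        · refine List.mem_append_left _ (by simp [List.mem_replicate]; omega)
        · exact List.mem_append_right _ (by simp)
  · rw [if_neg (show ¬(a - 1 = 0) from by omega), if_neg, hk]
    · split_ifs with h1 h2 <;> first | rfl | (exfalso; omega)
    · refine ofList_len_ne_one _ (x := a - 1) (y := b) ?_ ?_ (by omega)
      · simp
      · exact List.mem_cons_of_mem _ (List.mem_append_right _ (by simp))

lemma size_counter (L : List Int) :
    (PySem.Dict.counter L).size = (PySem.Set.ofList L).length := by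
  show (PySem.Dict.counter L).items.length = _
  rw [PySem.Dict.items_counter]
  simp

lemma two_sided (L : List Int) (a b : Int)
    (h1a : 1 ≤ a) (hab : a < b) (haL : a ∈ L) (hbL : b ∈ L)
    (hmem : ∀ z ∈ L, z = a ∨ z = b) :
    ATail L
      = if (a = 1 ∧ (PySem.Dict.counter L).getD a 0 = 1)
          ∨ (b = a + 1 ∧ (PySem.Dict.counter L).getD b 0 = 1) then 1 else 0 := by
  obtain ⟨ca', hca⟩ : ∃ n, L.count a = n + 1 := by
    have := List.count_pos_iff.mpr haL
    exact ⟨L.count a - 1, by omega⟩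
  obtain ⟨cb', hcb⟩ : ∃ n, L.count b = n + 1 := by
    have := List.count_pos_iff.mpr hbL
    exact ⟨L.count b - 1, by omega⟩
  have hsort := sorted_two L a b hab hmem
  rw [hca, hcb] at hsort
  rw [tail_eval L a b ca' cb' h1a hab hsort]
  rw [PySem.Dict.getD_counter, PySem.Dict.getD_counter, hca, hcb]
  split_ifs with h1 h2 <;> first | rfl | (exfalso; omega)

lemma core_eq (L : List Int) (hpos : ∀ x ∈ L, 1 ≤ x) : ACore L = BCore L := by
  have hsize := size_counter L
  have hkeys := PySem.Dict.keys_counter L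
  rcases hS : PySem.Set.ofList L with _ | ⟨x, S1⟩
  · have hL : L = [] := ofList_eq_nil hS
    subst hL
    decide
  rcases S1 with _ | ⟨y, S2⟩
  · -- all frequencies equal: both return 1
    rw [hS] at hsize
    simp only [ACore, BCore, hsize, hS, List.length_cons, List.length_nil]
    norm_num
  rcases S2 with _ | ⟨z, S3⟩
  · -- exactly two distinct frequency values
    rw [hS] at hsize
    have hnd := PySem.Set.nodup_ofList L
    rw [hS] at hnd
    have hxy : x ≠ y := by
      rw [List.nodup_cons] at hnd
      simpa using fun h => hnd.1 (by simp [h])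
    have hxL : x ∈ L := (PySem.Set.mem_ofList L x).mp (by rw [hS]; simp)
    have hyL : y ∈ L := (PySem.Set.mem_ofList L y).mp (by rw [hS]; simp)
    have hmemL : ∀ w ∈ L, w = x ∨ w = y := by
      intro w hw
      have := (PySem.Set.mem_ofList L w).mpr hw
      rw [hS] at this
      simpa using this
    simp only [ACore, BCore, hsize, hkeys, hS, List.length_cons, List.length_nil]
    rw [if_neg (by omega), if_neg (by omega), if_neg (by omega), if_pos (show True from trivial)]
    rw [PySem.List.min?_id_cons, PySem.List.max?_id_cons]
    simp only [List.foldl_cons, List.foldl_nil, Option.getD_some]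
    rcases lt_or_gt_of_ne hxy with hlt | hlt
    · simp only [min_eq_left hlt.le, max_eq_right hlt.le]
      exact two_sided L x y (hpos x hxL) hlt hxL hyL hmemL
    · simp only [min_eq_right hlt.le, max_eq_left hlt.le]
      exact two_sided L y x (hpos y hyL) hlt hyL hxL
        (fun w hw => (hmemL w hw).symm)
  · -- three or more distinct frequency values: both return 0
    rw [hS] at hsize
    simp only [ACore, BCore, hsize, hS, List.length_cons]
    rw [if_neg (by omega), if_pos (by omega), if_neg (by omega), if_neg (by omega)]

lemma A_eq_ACore (s : String) :
    sameFreq s = ACore ((PySem.Dict.counter s.toList).values) := by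
  simp only [sameFreq]
  rw [loopA]
  rw [← PySem.Dict.values_eq_map_keys _ (PySem.Dict.nodup_keys_counter _) 0]
  have hkl : ((PySem.Dict.counter s.toList).keys.length : Int)
      = (((PySem.Dict.counter s.toList).values).length : Int) := by
    show (((PySem.Dict.counter s.toList).items.map Prod.fst).length : Int) = _
    simp [PySem.Dict.values]
  simp only [ACore, ATail, KBranch, List.nil_append, hkl]
  have h0 : (PySem.Set.ofList ([] : List Int)) = [] := rfl
  rw [h0]
  simp only [List.length_nil, Nat.cast_zero]
  split_ifs with h1 h2 h3 <;> first | rfl | omega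

lemma B_eq_BCore (s : String) :
    sameFreq_alt s = BCore ((PySem.Dict.counter s.toList).values) := by
  rfl

-- ===== VERDICT (by name: the statement is the Claim_ definition above) =====
theorem sameFreq_spec : Claim_equal_sameFreq := by
  intro s _
  unfold Spec_sameFreq
  rw [A_eq_ACore, B_eq_BCore, core_eq _ (values_counter_pos _)]
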